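-- pv_equiv track=rewrite | github.com/alexandermichaud-drizly/daily_coding_problems | 2021_07_09_Anagram_Palindrome.py | anagram_is_palindrome
-- ===== SOURCE A (Python) =====
-- def anagram_is_palindrome (s: str) -> bool:
--     hash = {}
--     for c in s:
--         hash[c] = hash[c] + 1 if c in hash else 1
--
--     odds = 0
--     for k, v in hash.items():
--         if v % 2 != 0:
--             odds += 1
--             if odds > 1:
--                 return False
--
--     return True
-- ===== SOURCE B (Python) =====
-- def anagram_is_palindrome(s: str) -> bool:
--     odd = set()
--     for c in s:
--         if c in odd:
--             odd.discard(c)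
--         else:
--             odd.add(c)
--     return len(odd) <= 1
-- ===== Notes on version B (the rewrite author's own statement) =====
-- stated objective: idiomatic
-- what changed: Replaces the frequency dictionary plus a second odd-counting pass (with early-exit counter) by a single toggle pass over s maintaining the set of characters seen an odd number of times, then checks that set has at most one element.
import Mathlib
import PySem

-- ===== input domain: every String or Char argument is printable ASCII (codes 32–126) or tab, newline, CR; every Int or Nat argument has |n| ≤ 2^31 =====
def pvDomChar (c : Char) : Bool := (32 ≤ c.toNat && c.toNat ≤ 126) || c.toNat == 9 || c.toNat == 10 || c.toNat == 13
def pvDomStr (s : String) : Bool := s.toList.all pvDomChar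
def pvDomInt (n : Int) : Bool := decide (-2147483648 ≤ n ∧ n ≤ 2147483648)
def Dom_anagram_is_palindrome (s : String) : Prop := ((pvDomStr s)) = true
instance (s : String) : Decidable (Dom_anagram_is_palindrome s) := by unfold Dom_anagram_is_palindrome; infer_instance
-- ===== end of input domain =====

-- B replaces A's frequency dict + second odd-counting pass by one toggle pass over an odd-set (idiomatic, same asymptotic cost).

-- ===== PORT A =====
-- first loop: hash[c] = hash[c] + 1 if c in hash else 1
def aLoop1 (s : List Char) : PySem.Dict Char Int :=
  s.foldl (fun h c => h.insert c (if h.contains c then h.getD c 0 + 1 else 1)) PySem.Dict.empty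

-- second loop with early return once odds > 1
def aLoop2 : List (Char × Int) → Int → Bool
  | [], _ => true
  | (_, v) :: rest, odds =>
    if PySem.Int.mod v 2 ≠ 0 then
      if odds + 1 > 1 then false else aLoop2 rest (odds + 1)
    else aLoop2 rest odds

def anagram_is_palindrome (s : String) : Bool :=
  aLoop2 (aLoop1 s.toList).items 0

-- ===== PORT B =====
-- single toggle pass: if c in odd: odd.discard(c) else: odd.add(c)
def altLoop : List Char → PySem.Set Char → PySem.Set Char
  | [], odd => odd
  | c :: rest, odd =>
      altLoop rest (if PySem.Set.contains odd c then PySem.Set.discard odd c else PySem.Set.add odd c)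

def anagram_is_palindrome_alt (s : String) : Bool :=
  decide ((altLoop s.toList PySem.Set.empty).length ≤ 1)

-- ===== PRECONDITION & SPEC =====
def Spec_anagram_is_palindrome (s : String) (out : Bool) : Prop := out = anagram_is_palindrome_alt s
instance (s : String) (out : Bool) : Decidable (Spec_anagram_is_palindrome s out) := by unfold Spec_anagram_is_palindrome; infer_instance

-- ===== CLAIM (what is proved, stated in full; the proofs are below) =====
def Claim_equal_anagram_is_palindrome : Prop := ∀ (s : String), Dom_anagram_is_palindrome s → Spec_anagram_is_palindrome s (anagram_is_palindrome s)

-- ===== LEMMAS AND PROOFS =====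

theorem aLoop1_eq_counter (l : List Char) : aLoop1 l = PySem.Dict.counter l := by
  have hstep : (fun (h : PySem.Dict Char Int) (c : Char) =>
        h.insert c (if h.contains c then h.getD c 0 + 1 else 1))
      = fun (h : PySem.Dict Char Int) (c : Char) => h.insert c (h.getD c 0 + 1) := by
    funext h c
    by_cases hc : h.contains c = true
    · simp [hc]
    · have hc' : h.contains c = false := by simpa using hc
      have hg : h.getD c 0 = 0 := by rw [PySem.Dict.getD_of_not_contains]; exact hc'
      simp [hc', hg]
  rw [aLoop1, hstep, PySem.Dict.foldl_insert_getD_add_one_eq_counter]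

theorem mod_two_iff (n : Nat) : (¬ PySem.Int.mod (n : Int) 2 = 0) ↔ n % 2 = 1 := by
  have h : ((n : Int)).fmod 2 = (n : Int) % 2 := by
    rw [Int.fmod_eq_emod]; norm_num
  simp [PySem.Int.mod, h]
  omega

theorem aLoop2_eq (l : List (Char × Int)) (odds : Int) (h0 : 0 ≤ odds) (h1 : odds ≤ 1) :
    aLoop2 l odds =
      decide (odds + ((l.filter fun p => decide (¬ PySem.Int.mod p.2 2 = 0)).length : Int) ≤ 1) := by
  induction l generalizing odds with
  | nil => simp [aLoop2]; omega
  | cons p rest ih =>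
    obtain ⟨k, v⟩ := p
    by_cases hv : PySem.Int.mod v 2 ≠ 0
    · have hp : (decide (¬ PySem.Int.mod v 2 = 0)) = true := decide_eq_true hv
      by_cases ho : odds + 1 > 1
      · have hodds : odds = 1 := by omega
        subst hodds
        rw [aLoop2, if_pos hv, if_pos ho, List.filter_cons, hp]
        simp only [if_true, List.length_cons]
        simp
      · rw [aLoop2, if_pos hv, if_neg ho, ih (odds + 1) (by omega) (by omega),
          List.filter_cons, hp]
        simp only [if_true, List.length_cons, decide_eq_decide]
        push_cast
        omega
    · have hm : PySem.Int.mod v 2 = 0 := not_not.mp hv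
      have hp : (decide (¬ PySem.Int.mod v 2 = 0)) = false := decide_eq_false (not_not_intro hm)
      rw [aLoop2, if_neg hv, ih odds h0 h1, List.filter_cons, hp]
      simp

theorem altLoop_nodup (l : List Char) (odd : PySem.Set Char) (h : odd.Nodup) :
    (altLoop l odd).Nodup := by
  induction l generalizing odd with
  | nil => simpa [altLoop]
  | cons c rest ih =>
    rw [altLoop]
    apply ih
    split
    · exact PySem.Set.nodup_discard odd c h
    · exact PySem.Set.nodup_add odd c h

theorem altLoop_mem (l : List Char) (odd : PySem.Set Char) (x : Char) :
    x ∈ altLoop l odd ↔ ((x ∈ odd) ↔ l.count x % 2 = 0) := by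
  induction l generalizing odd with
  | nil => simp [altLoop]
  | cons c rest ih =>
    rw [altLoop, ih]
    split
    · rename_i hc
      have hcm : c ∈ odd := (PySem.Set.contains_iff odd c).mp hc
      by_cases hx : x = c
      · subst hx
        simp [PySem.Set.mem_discard, hcm]
        omega
      · have hx' : ¬ c = x := fun h => hx h.symm
        simp [PySem.Set.mem_discard, hx, hx']
    · rename_i hc
      have hcm : c ∉ odd := fun hm => absurd ((PySem.Set.contains_iff odd c).mpr hm) hc
      by_cases hx : x = c
      · subst hx
        simp [hcm]
        omega
      · have hx' : ¬ c = x := fun h => hx h.symm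
        simp [PySem.Set.mem_add, hx, hx']

-- ===== VERDICT (by name: the statement is the Claim_ definition above) =====

theorem anagram_is_palindrome_spec : Claim_equal_anagram_is_palindrome := by
  unfold Claim_equal_anagram_is_palindrome
  intro s _
  unfold Spec_anagram_is_palindrome anagram_is_palindrome anagram_is_palindrome_alt
  set S := s.toList with hS
  rw [aLoop1_eq_counter, aLoop2_eq _ 0 (by omega) (by omega), PySem.Dict.items_counter,
    List.filter_map]
  have hfin : ((PySem.Set.ofList S).filter
        ((fun p : Char × Int => decide (¬ PySem.Int.mod p.2 2 = 0)) ∘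
          fun k => (k, (S.count k : Int))))
      = (PySem.Set.ofList S).filter (fun k => decide (S.count k % 2 = 1)) := by
    apply List.filter_congr
    intro k _
    simp only [Function.comp, decide_eq_decide]
    exact mod_two_iff (S.count k)
  rw [hfin, List.length_map]
  have hperm : (altLoop S PySem.Set.empty).Perm
      ((PySem.Set.ofList S).filter (fun k => decide (S.count k % 2 = 1))) := by
    rw [List.perm_ext_iff_of_nodup (altLoop_nodup S PySem.Set.empty (by simp [PySem.Set.empty]))
      (List.Nodup.filter _ (PySem.Set.nodup_ofList S))]
    intro a
    rw [altLoop_mem, List.mem_filter]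
    constructor
    · intro h
      have hmem : a ∈ S := by
        rw [← List.count_pos_iff]
        simp [PySem.Set.empty] at h
        omega
      refine ⟨(PySem.Set.mem_ofList S a).mpr hmem, ?_⟩
      simp [PySem.Set.empty] at h
      simpa using (by omega : S.count a % 2 = 1)
    · intro ⟨_, hodd⟩
      simp [PySem.Set.empty]
      simp at hodd
      omega
  rw [hperm.length_eq]
  simp only [decide_eq_decide]
  omega
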